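-- pv_equiv track=rewrite | github.com/zyf9110/srtp | DBRB_missingData/DBRB/base.py | line_combination
-- ===== SOURCE A (Python) =====
-- def line_combination(A, j_=0):
--     """
--     线性组合属性值
--     :param j_:
--     :param A:
--     :return:
--     """
--     antecedent = []
--     flag = False
--     for i in range(len(A)):
--         if j_ >= len(A[i]):
--             antecedent.append(A[i][-1])
--         else:
--             flag = True
--             antecedent.append(A[i][j_])
--     if flag:
--         pre_rules = line_combination(A, j_ + 1)
--         pre_rules.append(antecedent)
--         return pre_rules
--     else:
--         return []
-- ===== SOURCE B (Python) =====
-- def line_combination(A, j_=0):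
--     if not A:
--         return []
--     maxlen = max(len(row) for row in A)
--     cols = []
--     for j in range(j_, maxlen):
--         cols.append([row[j] if j < len(row) else row[-1] for row in A])
--     cols.reverse()
--     return cols
-- ===== Notes on version B (the rewrite author's own statement) =====
-- stated objective: simpler
-- what changed: Replaced A's flag-driven recursion (which builds each column in a loop with a sentinel flag and recurses before appending) by a single iterative pass: compute the maximal row length once, build each column with a comprehension for j in range(j_, maxlen), and reverse the collected list.
-- outside the precondition, e.g. on line_combination([[1, 2], []], 0): A raises IndexError, B raises IndexError; on line_combination([[5]], -2): A raises IndexError, B raises IndexError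
import Mathlib
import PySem

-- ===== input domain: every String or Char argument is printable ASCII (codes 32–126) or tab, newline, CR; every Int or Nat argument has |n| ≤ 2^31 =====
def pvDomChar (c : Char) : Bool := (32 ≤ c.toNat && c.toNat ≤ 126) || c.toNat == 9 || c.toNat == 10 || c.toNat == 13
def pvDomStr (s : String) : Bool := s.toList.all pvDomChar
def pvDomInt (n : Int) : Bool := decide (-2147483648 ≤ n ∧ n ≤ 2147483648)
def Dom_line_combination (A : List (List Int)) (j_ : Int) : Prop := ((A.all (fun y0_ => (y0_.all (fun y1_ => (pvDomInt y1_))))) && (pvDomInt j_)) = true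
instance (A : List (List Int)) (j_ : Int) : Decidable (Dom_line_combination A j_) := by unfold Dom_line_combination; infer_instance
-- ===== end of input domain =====

-- B replaces A's flag-driven recursion by computing the maximal row length once and mapping a
-- column builder over range(j_, maxlen), reversing at the end (objective: simpler decomposition).

-- ===== PORT A =====
-- helper for A's termination measure only
def pvMaxLen (A : List (List Int)) : Int := A.foldl (fun m r => max m (r.length : Int)) 0

-- the body of A's for-loop over range(len(A)): accumulates (antecedent, flag)
def pvStepA (A : List (List Int)) (j_ : Int) : List Int × Bool :=
  A.foldl (fun acc row =>
    if j_ ≥ (row.length : Int) then (acc.1 ++ [PySem.List.pyGetD row (-1) 0], acc.2)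
    else (acc.1 ++ [PySem.List.pyGetD row j_ 0], true)) ([], false)

-- characterisation of A's loop, needed (via pvStepA_flag_lt) for the port's termination
lemma pvStepA_foldl (j_ : Int) : ∀ (A : List (List Int)) (acc : List Int × Bool),
    A.foldl (fun acc row =>
      if j_ ≥ (row.length : Int) then (acc.1 ++ [PySem.List.pyGetD row (-1) 0], acc.2)
      else (acc.1 ++ [PySem.List.pyGetD row j_ 0], true)) acc
    = (acc.1 ++ A.map (fun row => if j_ ≥ (row.length : Int) then PySem.List.pyGetD row (-1) 0
          else PySem.List.pyGetD row j_ 0),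
       acc.2 || A.any (fun r => decide (j_ < (r.length : Int)))) := by
  intro A
  induction A with
  | nil => intro acc; simp
  | cons r t ih =>
    intro acc
    by_cases h : j_ ≥ (r.length : Int)
    · simp [h, ih, not_lt.mpr h]
    · simp [h, ih, lt_of_not_ge h]

lemma lt_foldl_max_iff : ∀ (l : List Int) (m j : Int),
    j < l.foldl max m ↔ j < m ∨ ∃ x ∈ l, j < x := by
  intro l
  induction l with
  | nil => simp
  | cons x t ih =>
    intro m j
    simp [List.foldl_cons, ih]
    tauto

lemma pvStepA_flag_lt (A : List (List Int)) (j_ : Int)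
    (h : (pvStepA A j_).2 = true) : j_ < pvMaxLen A := by
  unfold pvStepA at h
  rw [pvStepA_foldl] at h
  simp at h
  obtain ⟨r, hr, hlt⟩ := h
  have hM : pvMaxLen A = (A.map (fun r => (r.length : Int))).foldl max 0 := by
    unfold pvMaxLen; rw [List.foldl_map]
  rw [hM, lt_foldl_max_iff]
  exact Or.inr ⟨_, List.mem_map_of_mem hr, hlt⟩

def line_combination (A : List (List Int)) (j_ : Int) : List (List Int) :=
  let p := pvStepA A j_
  if hf : p.2 = true then
    let pre_rules := line_combination A (j_ + 1)
    pre_rules ++ [p.1]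
  else []
termination_by (pvMaxLen A - j_).toNat
decreasing_by
  have := pvStepA_flag_lt A j_ hf
  omega

-- ===== PORT B =====
def line_combination_alt (A : List (List Int)) (j_ : Int) : List (List Int) :=
  if A = [] then []
  else
    let maxlen := (PySem.List.max? (A.map (fun r => (r.length : Int))) (fun x => x)).getD 0
    ((PySem.List.pyRange j_ maxlen 1).map (fun j =>
        A.map (fun row => if j < (row.length : Int) then PySem.List.pyGetD row j 0
                          else PySem.List.pyGetD row (-1) 0))).reverse

-- ===== PRECONDITION & SPEC =====
-- Pre_ excludes exactly the inputs on which Python A raises IndexError: a nonempty matrix with an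
-- empty row (row[-1] fails), or a negative j_ whose wraparound index is out of range for some row.
def Pre_line_combination (A : List (List Int)) (j_ : Int) : Prop :=
  A = [] ∨ ((∀ r ∈ A, r ≠ []) ∧ (0 ≤ j_ ∨ ∀ r ∈ A, -j_ ≤ (r.length : Int)))
instance (A : List (List Int)) (j_ : Int) : Decidable (Pre_line_combination A j_) := by
  unfold Pre_line_combination; infer_instance

def pvWitness_line_combination : List (List Int) × Int := ([[1, 2], [3]], 0)

def Spec_line_combination (A : List (List Int)) (j_ : Int) (out : List (List Int)) : Prop := out = line_combination_alt A j_
instance (A : List (List Int)) (j_ : Int) (out : List (List Int)) : Decidable (Spec_line_combination A j_ out) := by unfold Spec_line_combination; infer_instance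

-- ===== CLAIM (what is proved, stated in full; the proofs are below) =====
def Claim_equal_line_combination : Prop := ∀ (A : List (List Int)) (j_ : Int), Dom_line_combination A j_ → Pre_line_combination A j_ → Spec_line_combination A j_ (line_combination A j_)

-- ===== LEMMAS AND PROOFS =====
-- B's column at index j (proof abbreviation; definitionally the lambda in line_combination_alt)
def pvColB (A : List (List Int)) (j : Int) : List Int :=
  A.map (fun row => if j < (row.length : Int) then PySem.List.pyGetD row j 0
                    else PySem.List.pyGetD row (-1) 0)

lemma pvStepA_fst (A : List (List Int)) (j : Int) : (pvStepA A j).1 = pvColB A j := by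
  unfold pvStepA pvColB
  rw [pvStepA_foldl]
  simp only [List.nil_append]
  apply List.map_congr_left
  intro row _
  by_cases h : j ≥ (row.length : Int)
  · simp [h, not_lt.mpr h]
  · simp [h, lt_of_not_ge h]

lemma pvFlag_iff (A : List (List Int)) (j : Int) (hA : A ≠ []) :
    (pvStepA A j).2 = true ↔ j < pvMaxLen A := by
  constructor
  · exact pvStepA_flag_lt A j
  · intro hj
    unfold pvStepA
    rw [pvStepA_foldl]
    have hM : pvMaxLen A = (A.map (fun r => (r.length : Int))).foldl max 0 := by
      unfold pvMaxLen; rw [List.foldl_map]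
    rw [hM, lt_foldl_max_iff] at hj
    simp only [Bool.false_or, List.any_eq_true, decide_eq_true_eq]
    rcases hj with hj | ⟨x, hx, hlt⟩
    · obtain ⟨r, t, rfl⟩ := List.exists_cons_of_ne_nil hA
      exact ⟨r, List.mem_cons_self, by omega⟩
    · obtain ⟨r, hr, rfl⟩ := List.mem_map.mp hx
      exact ⟨r, hr, hlt⟩

lemma pvMaxlen_eq (A : List (List Int)) (hA : A ≠ []) :
    (PySem.List.max? (A.map (fun r => (r.length : Int))) (fun x => x)).getD 0 = pvMaxLen A := by
  obtain ⟨r, t, rfl⟩ := List.exists_cons_of_ne_nil hA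
  rw [List.map_cons, PySem.List.max?_id_cons]
  have : pvMaxLen (r :: t) = (t.map (fun r => (r.length : Int))).foldl max ((r.length : Int)) := by
    unfold pvMaxLen
    rw [List.foldl_cons, max_eq_right (by positivity)]
    rw [List.foldl_map]
  simp [this]

lemma pvMain : ∀ (n : Nat) (A : List (List Int)) (j : Int), A ≠ [] →
    (pvMaxLen A - j).toNat = n →
    line_combination A j
      = ((PySem.List.pyRange j (pvMaxLen A) 1).map (fun k => pvColB A k)).reverse := by
  intro n
  induction n with
  | zero =>
    intro A j hA hn
    rw [line_combination]
    have hf : ¬ (pvStepA A j).2 = true := by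
      rw [pvFlag_iff A j hA]; omega
    simp [hf, PySem.List.pyRange_one_eq_nil (by omega : pvMaxLen A ≤ j)]
  | succ m ih =>
    intro A j hA hn
    rw [line_combination]
    by_cases hf : (pvStepA A j).2 = true
    · have hj : j < pvMaxLen A := pvStepA_flag_lt A j hf
      simp only [hf, dif_pos]
      rw [ih A (j + 1) hA (by omega), pvStepA_fst,
          PySem.List.pyRange_one_cons hj, List.map_cons, List.reverse_cons]
    · have hj : ¬ j < pvMaxLen A := fun h => hf ((pvFlag_iff A j hA).mpr h)
      simp [hf, PySem.List.pyRange_one_eq_nil (by omega : pvMaxLen A ≤ j)]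

-- ===== VERDICT (by name: the statement is the Claim_ definition above) =====
theorem line_combination_spec : Claim_equal_line_combination := by
  intro A j _ _
  unfold Spec_line_combination line_combination_alt
  by_cases hA : A = []
  · subst hA
    rw [line_combination]
    simp [pvStepA]
  · rw [if_neg hA]
    rw [pvMaxlen_eq A hA, pvMain (pvMaxLen A - j).toNat A j hA rfl]
    rfl
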